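-- pv_equiv track=rewrite | github.com/caelum1125/CSE476Final | solver_agent.py | _sc_vote_cs
-- ===== SOURCE A (Python) =====
-- from collections import Counter, defaultdict, deque
--
-- def _sc_vote_cs(answers: list) -> str:
--     if not answers:
--         return ""
--     normalized = [a.lower().strip() for a in answers]
--     winner     = Counter(normalized).most_common(1)[0][0]
--     for a in answers:
--         if a.lower().strip() == winner:
--             return a
--     return answers[0]
-- ===== SOURCE B (Python) =====
-- def _sc_vote_cs(answers: list) -> str:
--     normalized = [a.lower().strip() for a in answers]
--     best, best_c = "", 0
--     for a, n in zip(answers, normalized):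
--         c = normalized.count(n)
--         if c > best_c:
--             best, best_c = a, c
--     return best
-- ===== Notes on version B (the rewrite author's own statement) =====
-- stated objective: alternative
-- what changed: B drops the Counter, most_common sort and second winner scan entirely: one brute-force loop over zip(answers, normalized) keeps the first answer whose full-list normalized count is strictly greater than the best so far (strict > reproduces most_common's first-insertion tie-break), trading A's hash counting for a count()-per-element scan.
import Mathlib
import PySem

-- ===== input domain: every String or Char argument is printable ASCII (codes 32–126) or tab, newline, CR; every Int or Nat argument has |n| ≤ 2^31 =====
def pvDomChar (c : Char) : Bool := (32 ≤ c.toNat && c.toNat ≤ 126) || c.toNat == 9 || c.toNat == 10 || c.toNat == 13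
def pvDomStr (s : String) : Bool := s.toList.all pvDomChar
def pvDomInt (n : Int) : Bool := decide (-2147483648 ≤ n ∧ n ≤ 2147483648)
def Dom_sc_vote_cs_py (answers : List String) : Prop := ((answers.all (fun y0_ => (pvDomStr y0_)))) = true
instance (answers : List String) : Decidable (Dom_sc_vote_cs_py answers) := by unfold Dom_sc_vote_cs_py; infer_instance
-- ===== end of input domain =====

-- B replaces A's Counter + most_common sort + second winner scan by ONE brute-force loop over
-- zip(answers, normalized) keeping the first answer whose full-list normalized count is strictly
-- greatest (no Counter, no dict, no sort, no second pass; alternative algorithm, quadratic).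

-- ===== PORT A =====
-- a.lower().strip(), A's normalization
def pvNorm (a : String) : String := PySem.Str.strip (PySem.Str.lower a)

-- A's for-loop: first answer whose normalization equals the winner (none = loop fell through)
def pvFirstMatch (w : String) : List String → Option String
  | [] => none
  | a :: rest => if pvNorm a = w then some a else pvFirstMatch w rest

def sc_vote_cs_py (answers : List String) : String :=
  if answers = [] then ""
  else
    let normalized := answers.map (fun a => pvNorm a)
    -- Counter(normalized).most_common(1)[0][0]: stable reverse sort of the counter items by count
    let winner := (PySem.List.pyGetD
        (PySem.List.sorted (PySem.Dict.counter normalized).items (fun p => p.2) true)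
        0 ("", 0)).1
    match pvFirstMatch winner answers with
    | some a => a
    | none => PySem.List.pyGetD answers 0 ""

-- ===== PORT B =====
-- one loop over zip(answers, normalized); c = normalized.count(n); keep (a, c) on strict increase
def sc_vote_cs_py_alt (answers : List String) : String :=
  let normalized := answers.map (fun a => PySem.Str.strip (PySem.Str.lower a))
  ((answers.zip normalized).foldl
      (fun b p => if ((normalized.count p.2 : Int)) > b.2 then (p.1, ((normalized.count p.2 : Int))) else b)
      ("", 0)).1

-- ===== PRECONDITION & SPEC =====
def Spec_sc_vote_cs_py (answers : List String) (out : String) : Prop := out = sc_vote_cs_py_alt answers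
instance (answers : List String) (out : String) : Decidable (Spec_sc_vote_cs_py answers out) := by unfold Spec_sc_vote_cs_py; infer_instance

-- ===== CLAIM (what is proved, stated in full; the proofs are below) =====
def Claim_equal_sc_vote_cs_py : Prop := ∀ (answers : List String), Dom_sc_vote_cs_py answers → Spec_sc_vote_cs_py answers (sc_vote_cs_py answers)

-- ===== LEMMAS AND PROOFS =====

-- first element of b :: L attaining the maximal stored count (left fold, replace only on strictly greater)
def pvG (b : String × Int) (L : List (String × Int)) : String × Int :=
  L.foldl (fun b p => if p.2 > b.2 then p else b) b

lemma pvG_cons (b p : String × Int) (L : List (String × Int)) :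
    pvG b (p :: L) = pvG (if p.2 > b.2 then p else b) L := by
  simp [pvG]

lemma pvG_mem (L : List (String × Int)) : ∀ b, pvG b L ∈ b :: L := by
  induction L with
  | nil => intro b; simp [pvG]
  | cons p L ih =>
    intro b
    rw [pvG_cons]
    by_cases h : p.2 > b.2
    · rw [if_pos h]
      rcases List.mem_cons.1 (ih p) with h1 | h1
      · simp [h1]
      · simp [h1]
    · rw [if_neg h]
      rcases List.mem_cons.1 (ih b) with h1 | h1
      · simp [h1]
      · simp [h1]

-- B's fold, abstracted: pairs (payload, key), count function c on keys
def pvPick (c : String → Int) (b : String × Int) (L : List (String × String)) : String × Int :=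
  L.foldl (fun b p => if c p.2 > b.2 then (p.1, c p.2) else b) b

lemma pvPick_cons (c : String → Int) (b : String × Int) (p : String × String)
    (L : List (String × String)) :
    pvPick c b (p :: L) = pvPick c (if c p.2 > b.2 then (p.1, c p.2) else b) L := by
  simp [pvPick]

-- duplicates of a key already dominated by the accumulator are no-ops
lemma pvPick_filter (c : String → Int) (v : String) :
    ∀ (L : List (String × String)) (b : String × Int), c v ≤ b.2 →
      pvPick c b L = pvPick c b (L.filter (fun q => q.2 != v)) := by
  intro L
  induction L with
  | nil => intro b _; rfl
  | cons p L ih =>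
    intro b hb
    by_cases hp : p.2 = v
    · have hcond : ¬ c p.2 > b.2 := by rw [hp]; omega
      rw [pvPick_cons, if_neg hcond,
        show (p :: L).filter (fun q => q.2 != v) = L.filter (fun q => q.2 != v) by
          simp [hp]]
      exact ih b hb
    · have hkeep : (p :: L).filter (fun q => q.2 != v)
          = p :: L.filter (fun q => q.2 != v) := by simp [hp]
      rw [hkeep, pvPick_cons, pvPick_cons]
      by_cases hc : c p.2 > b.2
      · rw [if_pos hc]; exact ih _ (by simp; omega)
      · rw [if_neg hc]; exact ih _ hb

-- Set.add on a cons, foreign head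
lemma pvAdd_cons (acc : List String) (u v : String) (h : u ≠ v) :
    PySem.Set.add (v :: acc) u = v :: PySem.Set.add acc u := by
  show (if (v :: acc).contains u then v :: acc else (v :: acc) ++ [u])
      = v :: (if acc.contains u then acc else acc ++ [u])
  rw [List.contains_cons]
  rw [show (u == v) = false by simp [h], Bool.false_or]
  by_cases hc : u ∈ acc <;> simp [hc]

-- later duplicates of an element already collected are no-ops for Set.add
lemma pvAdd_foldl_dup (v : String) :
    ∀ (xs : List String) (acc : PySem.Set String), v ∈ acc →
      xs.foldl PySem.Set.add acc = (xs.filter (fun u => u != v)).foldl PySem.Set.add acc := by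
  intro xs
  induction xs with
  | nil => intro acc _; rfl
  | cons u xs ih =>
    intro acc hv
    by_cases hu : u = v
    · have hv' : u ∈ acc := by rw [hu]; exact hv
      have hadd : PySem.Set.add acc u = acc := by
        simp [PySem.Set.add, PySem.Set.contains, hv']
      have hfc : (u :: xs).filter (fun w => w != v) = xs.filter (fun w => w != v) := by
        simp [hu]
      rw [hfc, List.foldl_cons, hadd]
      exact ih acc hv
    · have hmem : v ∈ PySem.Set.add acc u := by
        simp [PySem.Set.mem_add]; tauto
      have hfc : (u :: xs).filter (fun u => u != v)
          = u :: xs.filter (fun u => u != v) := by simp [hu]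
      rw [hfc, List.foldl_cons, List.foldl_cons]
      exact ih _ hmem

lemma pvAdd_foldl_cons (v : String) :
    ∀ (xs : List String) (acc : List String), (∀ u ∈ xs, u ≠ v) →
      xs.foldl PySem.Set.add (v :: acc) = v :: xs.foldl PySem.Set.add acc := by
  intro xs
  induction xs with
  | nil => intro acc _; rfl
  | cons u xs ih =>
    intro acc hne
    have hu : u ≠ v := hne u (by simp)
    simp only [List.foldl_cons]
    rw [pvAdd_cons acc u v hu]
    exact ih _ (fun x hx => hne x (by simp [hx]))

-- PySem.Set.ofList peels its head and drops the head's later duplicates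
lemma pvOfList_cons_filter (v : String) (xs : List String) :
    PySem.Set.ofList (v :: xs) = v :: PySem.Set.ofList (xs.filter (fun u => u != v)) := by
  have h0 : PySem.Set.ofList (v :: xs) = xs.foldl PySem.Set.add [v] := by
    rw [PySem.Set.ofList_eq_foldl, List.foldl_cons]
    rfl
  rw [h0, pvAdd_foldl_dup v xs [v] (by simp)]
  rw [show ([v] : List String) = v :: ([] : List String) from rfl]
  rw [pvAdd_foldl_cons v _ [] (by intro u hu; simpa using (List.of_mem_filter hu))]
  rw [PySem.Set.ofList_eq_foldl]

-- filtering away a foreign normalization does not change the first match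
lemma pvFirstMatch_filter (k v : String) (hkv : k ≠ v) :
    ∀ (as : List String),
      pvFirstMatch k (as.filter (fun x => pvNorm x != v)) = pvFirstMatch k as := by
  intro as
  induction as with
  | nil => rfl
  | cons a as ih =>
    by_cases ha : pvNorm a = v
    · have hak : pvNorm a ≠ k := by rw [ha]; exact fun h => hkv h.symm
      have hfc : (a :: as).filter (fun x => pvNorm x != v)
          = as.filter (fun x => pvNorm x != v) := by simp [ha]
      rw [hfc, ih, show pvFirstMatch k (a :: as) = pvFirstMatch k as by
        simp [pvFirstMatch, hak]]
    · simp only [List.filter_cons, show (pvNorm a != v) = true by simp [ha]]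
      by_cases hk : pvNorm a = k
      · simp [pvFirstMatch, hk]
      · simp [pvFirstMatch, hk, ih]

lemma pvFilterMapPair (v : String) (as : List String) :
    (as.map (fun x => (x, pvNorm x))).filter (fun q => q.2 != v)
      = (as.filter (fun x => pvNorm x != v)).map (fun x => (x, pvNorm x)) := by
  induction as with
  | nil => rfl
  | cons b bs ihb =>
    by_cases hb : pvNorm b = v
    · simp [hb, ihb]
    · simp [hb, ihb]

lemma pvFilterMapNorm (v : String) (as : List String) :
    (as.map pvNorm).filter (fun u => u != v)
      = (as.filter (fun x => pvNorm x != v)).map pvNorm := by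
  induction as with
  | nil => rfl
  | cons b bs ihb =>
    by_cases hb : pvNorm b = v
    · simp [hb, ihb]
    · simp [hb, ihb]

-- MAIN: B's fold over (answer, normalization) pairs equals the same fold over the distinct
-- normalizations in first-occurrence order, each paired with its first matching answer
lemma pvMain (c : String → Int) :
    ∀ (n : Nat) (as : List String) (b : String × Int), as.length ≤ n →
      pvPick c b (as.map (fun a => (a, pvNorm a)))
        = pvPick c b ((PySem.Set.ofList (as.map pvNorm)).map
            (fun k => ((pvFirstMatch k as).getD "", k))) := by
  intro n
  induction n with
  | zero =>
    intro as b h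
    have : as = [] := List.eq_nil_of_length_eq_zero (Nat.le_zero.1 h)
    subst this; rfl
  | succ n ih =>
    intro as b h
    cases as with
    | nil => rfl
    | cons a as =>
      have hfm := pvFilterMapPair (pvNorm a) as
      have hmapf := pvFilterMapNorm (pvNorm a) as
      -- both sides take the same first step to accumulator b'
      have hhead : pvFirstMatch (pvNorm a) (a :: as) = some a := by
        simp [pvFirstMatch]
      rw [show (a :: as).map (fun x => (x, pvNorm x))
            = (a, pvNorm a) :: as.map (fun x => (x, pvNorm x)) from rfl, pvPick_cons]
      rw [show (a :: as).map pvNorm = pvNorm a :: as.map pvNorm from rfl,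
        pvOfList_cons_filter, hmapf]
      rw [show ((pvNorm a :: PySem.Set.ofList ((as.filter (fun x => pvNorm x != pvNorm a)).map pvNorm)).map
            (fun k => ((pvFirstMatch k (a :: as)).getD "", k)))
          = ((pvFirstMatch (pvNorm a) (a :: as)).getD "", pvNorm a)
            :: (PySem.Set.ofList ((as.filter (fun x => pvNorm x != pvNorm a)).map pvNorm)).map
                (fun k => ((pvFirstMatch k (a :: as)).getD "", k)) from rfl,
        hhead, pvPick_cons]
      rw [show ((some a).getD "" , pvNorm a) = (a, pvNorm a) from rfl]
      set b' : String × Int := if c (pvNorm a) > b.2 then (a, c (pvNorm a)) else b with hb'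
      have hdom : c (pvNorm a) ≤ b'.2 := by
        rw [hb']
        by_cases hcc : c (pvNorm a) > b.2
        · rw [if_pos hcc]
        · rw [if_neg hcc]; omega
      -- left side: drop the later duplicates of pvNorm a, then apply the IH
      rw [pvPick_filter c (pvNorm a) _ _ hdom, hfm,
        ih (as.filter (fun x => pvNorm x != pvNorm a)) b'
          (le_trans (List.length_filter_le _ _) (Nat.le_of_succ_le_succ h))]
      -- right side: first matches over a :: as agree with those over the filtered list
      have hmc : (PySem.Set.ofList ((as.filter (fun x => pvNorm x != pvNorm a)).map pvNorm)).map
            (fun k => ((pvFirstMatch k (a :: as)).getD "", k))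
          = (PySem.Set.ofList ((as.filter (fun x => pvNorm x != pvNorm a)).map pvNorm)).map
            (fun k => ((pvFirstMatch k (as.filter (fun x => pvNorm x != pvNorm a))).getD "", k)) := by
        apply List.map_congr_left
        intro k hk
        have hk' : k ∈ (as.filter (fun x => pvNorm x != pvNorm a)).map pvNorm :=
          (PySem.Set.mem_ofList _ _).1 hk
        obtain ⟨x, hx, rfl⟩ := List.mem_map.1 hk'
        have hne : pvNorm x ≠ pvNorm a := by simpa using List.of_mem_filter hx
        have hax : pvNorm a ≠ pvNorm x := fun hh => hne hh.symm
        have h1 : pvFirstMatch (pvNorm x) (a :: as) = pvFirstMatch (pvNorm x) as := by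
          simp [pvFirstMatch, hax]
        have h2 : pvFirstMatch (pvNorm x) (as.filter (fun y => pvNorm y != pvNorm a))
            = pvFirstMatch (pvNorm x) as := pvFirstMatch_filter _ _ hne as
        rw [h1, h2]
      rw [hmc]

-- B's fold over the deduped pairs runs in lockstep with A's strict-max scan over (key, count)
lemma pvLockstep (c : String → Int) (as : List String) :
    ∀ (ks : List String) (x : String) (m : Int),
      pvPick c ((pvFirstMatch x as).getD "", m)
          (ks.map (fun k => ((pvFirstMatch k as).getD "", k)))
        = ((pvFirstMatch (pvG (x, m) (ks.map (fun k => (k, c k)))).1 as).getD "",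
           (pvG (x, m) (ks.map (fun k => (k, c k)))).2) := by
  intro ks
  induction ks with
  | nil => intro x m; simp [pvPick, pvG]
  | cons k ks ih =>
    intro x m
    rw [show (k :: ks).map (fun k => ((pvFirstMatch k as).getD "", k))
          = ((pvFirstMatch k as).getD "", k) :: ks.map (fun k => ((pvFirstMatch k as).getD "", k))
        from rfl,
      show (k :: ks).map (fun k => (k, c k)) = (k, c k) :: ks.map (fun k => (k, c k)) from rfl,
      pvPick_cons, pvG_cons]
    by_cases hc : c k > m
    · rw [if_pos hc, if_pos hc]; exact ih k (c k)
    · rw [if_neg hc, if_neg hc]; exact ih x m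

-- zip of a list with its own map
lemma pvZipMap (as : List String) (f : String → String) :
    as.zip (as.map f) = as.map (fun a => (a, f a)) := by
  induction as with
  | nil => rfl
  | cons a as ih => simp [ih]

-- head of insertBy with the reverse-sort comparator
lemma pvInsertBy_cons (x y : String × Int) (ys : List (String × Int)) :
    PySem.List.insertBy (fun a b : String × Int => decide (b.2 < a.2)) x (y :: ys)
      = if y.2 < x.2 then x :: y :: ys else y :: PySem.List.insertBy (fun a b : String × Int => decide (b.2 < a.2)) x ys := by
  simp [PySem.List.insertBy]

-- head of the insertion-sort fold is the first maximal element of the input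
lemma pvHead_fold (L : List (String × Int)) :
    ∀ (acc : List (String × Int)) (b : String × Int), acc.head? = some b →
      (L.foldl (fun acc x => PySem.List.insertBy (fun a b : String × Int => decide (b.2 < a.2)) x acc) acc).head?
        = some (pvG b L) := by
  induction L with
  | nil => intro acc b h; simpa [pvG] using h
  | cons x L ih =>
    intro acc b h
    obtain ⟨t, rfl⟩ : ∃ t, acc = b :: t := by
      cases acc with
      | nil => simp at h
      | cons a t =>
          simp only [List.head?_cons, Option.some.injEq] at h
          exact ⟨t, by rw [h]⟩
    rw [List.foldl_cons, pvG_cons]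
    by_cases hlt : b.2 < x.2
    · rw [if_pos (by simpa using hlt)]
      exact ih _ x (by rw [pvInsertBy_cons, if_pos hlt]; rfl)
    · rw [if_neg (by simpa using hlt)]
      exact ih _ b (by rw [pvInsertBy_cons, if_neg hlt]; rfl)

lemma pvFirstMatch_some (w : String) :
    ∀ (answers : List String), (∃ a ∈ answers, pvNorm a = w) →
      ∃ a0, pvFirstMatch w answers = some a0 := by
  intro answers
  induction answers with
  | nil => rintro ⟨a, h, -⟩; simp at h
  | cons a rest ih =>
    rintro ⟨a', ha', hn⟩
    by_cases h : pvNorm a = w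
    · exact ⟨a, by simp [pvFirstMatch, h]⟩
    · rcases List.mem_cons.1 ha' with rfl | ha'
      · exact absurd hn h
      · obtain ⟨a0, h0⟩ := ih ⟨a', ha', hn⟩
        exact ⟨a0, by simp [pvFirstMatch, h, h0]⟩

-- ===== VERDICT (by name: the statement is the Claim_ definition above) =====
theorem sc_vote_cs_py_spec : Claim_equal_sc_vote_cs_py := by
  intro answers _hdom
  show sc_vote_cs_py answers = sc_vote_cs_py_alt answers
  by_cases hne : answers = []
  · subst hne; rfl
  · -- shared data
    set ns : List String := answers.map pvNorm with hns
    set c : String → Int := fun v => ((ns.count v : Int)) with hc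
    have hns_ne : ns ≠ [] := by simpa [hns] using hne
    -- counter items have the shape (k, count) :: map …
    have hitems : (PySem.Dict.counter ns).items
        = (PySem.Set.ofList ns).map (fun k => (k, (ns.count k : Int))) :=
      PySem.Dict.items_counter ns
    obtain ⟨k, ks, hofl⟩ : ∃ k ks, PySem.Set.ofList ns = k :: ks := by
      cases hS : PySem.Set.ofList ns with
      | nil =>
          exfalso
          obtain ⟨n0, hn0⟩ : ∃ n0, n0 ∈ ns := by
            cases hnse : ns with
            | nil => exact absurd hnse hns_ne
            | cons n0 l => exact ⟨n0, by simp⟩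
          have : n0 ∈ PySem.Set.ofList ns := (PySem.Set.mem_ofList _ _).2 hn0
          rw [hS] at this; simp at this
      | cons k ks => exact ⟨k, ks, rfl⟩
    set p : String × Int := (k, (ns.count k : Int)) with hp_def
    set t : List (String × Int) := ks.map (fun k => (k, (ns.count k : Int))) with ht_def
    have hL : (PySem.Dict.counter ns).items = p :: t := by rw [hitems, hofl]; rfl
    have hk_mem : k ∈ ns := (PySem.Set.mem_ofList ns k).1 (by rw [hofl]; simp)
    have hp_pos : 0 < p.2 := by
      have : 0 < ns.count k := List.count_pos_iff.2 hk_mem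
      simpa [hp_def] using (by exact_mod_cast this : (0 : Int) < (ns.count k : Int))
    -- the winner both sides select
    set w : String := (pvG p t).1 with hw_def
    have hw_mem : w ∈ ns := by
      have hmem : pvG p t ∈ p :: t := pvG_mem t p
      have : (pvG p t).1 ∈ ((PySem.Dict.counter ns).items).map (fun q => q.1) := by
        rw [hL]; exact List.mem_map_of_mem hmem
      have hkeys : ((PySem.Dict.counter ns).items).map (fun q => q.1) = PySem.Set.ofList ns :=
        PySem.Dict.keys_counter ns
      rw [hkeys] at this
      exact (PySem.Set.mem_ofList ns w).1 this
    obtain ⟨aw, haw_mem, haw⟩ : ∃ a ∈ answers, pvNorm a = w := by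
      obtain ⟨a, ha, hae⟩ := List.mem_map.1 (hns ▸ hw_mem)
      exact ⟨a, ha, hae⟩
    obtain ⟨a0, ha0⟩ := pvFirstMatch_some w answers ⟨aw, haw_mem, haw⟩
    -- A computes w as the winner
    have hA : sc_vote_cs_py answers = a0 := by
      have hsorted : (PySem.List.sorted (PySem.Dict.counter ns).items (fun q => q.2) true).head?
          = some (pvG p t) := by
        rw [PySem.List.sorted_rev_eq_foldl_insertBy, hL, List.foldl_cons]
        have h1 : PySem.List.insertBy (fun a b : String × Int => decide (b.2 < a.2)) p [] = [p] := by
          simp [PySem.List.insertBy]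
        exact pvHead_fold t _ p (by rw [h1]; rfl)
      obtain ⟨tl, htl⟩ : ∃ tl,
          PySem.List.sorted (PySem.Dict.counter ns).items (fun q => q.2) true = pvG p t :: tl := by
        cases hS : PySem.List.sorted (PySem.Dict.counter ns).items (fun q => q.2) true with
        | nil => rw [hS] at hsorted; simp at hsorted
        | cons z tl =>
            rw [hS] at hsorted; simp at hsorted
            exact ⟨tl, by rw [hsorted]⟩
      simp only [sc_vote_cs_py, if_neg hne]
      rw [show answers.map (fun a => pvNorm a) = ns from rfl, htl,
        PySem.List.pyGetD_zero]
      simp only [List.getD_cons_zero, ← hw_def, ha0]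
    -- B: dedup the zip by key, then run in lockstep with pvG over the counter items
    have hB : sc_vote_cs_py_alt answers = a0 := by
      have halt : sc_vote_cs_py_alt answers
          = (pvPick c ("", 0) (answers.zip ns)).1 := rfl
      rw [halt, pvZipMap answers pvNorm,
        pvMain c answers.length answers ("", 0) le_rfl]
      rw [show answers.map pvNorm = ns from rfl, hofl]
      rw [show (k :: ks).map (fun k => ((pvFirstMatch k answers).getD "", k))
            = ((pvFirstMatch k answers).getD "", k)
              :: ks.map (fun k => ((pvFirstMatch k answers).getD "", k)) from rfl,
        pvPick_cons]
      have hck : c k > (("", 0) : String × Int).2 := by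
        simpa [hc, hp_def] using hp_pos
      rw [if_pos hck]
      have hkt : ks.map (fun k => (k, c k)) = t := by
        rw [ht_def]
      have := pvLockstep c answers ks k (c k)
      rw [hkt] at this
      rw [this]
      have hpt : ((k : String), c k) = p := by rw [hp_def]
      rw [hpt, ← hw_def, ha0]
      rfl
    rw [hA, hB]
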